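-- pv_equiv track=rewrite | github.com/arcaillon/TIPE-2022 | Polynomes et Zernike/Polynomes.py | somme2v
-- ===== SOURCE A (Python) =====
-- import copy
--
-- def normalize1v (pol1):
--     s=copy.deepcopy (pol1)
--     while s[-1]==0 and len(s)>1:
--         s.pop(len(s)-1)
--     return s
--
-- def somme1v (pol1,pol2):
--     p=copy.deepcopy (pol1)
--     q=copy.deepcopy(pol2)
--     p1=normalize1v(p)
--     q1=normalize1v(q)
--     n,m=len(p1),len(q1)
--     if n > m :
--         s = p1
--         for i in range (m) :
--             s[i] += q[i]
--     else :
--         s = q1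
--         for i in range (n) :
--             s[i] += p[i]
--     return s
--
-- def  normalize2v (pol):
--     p=copy.deepcopy(pol)
--     n=len(p)
--     for i in range (n):
--         p[i]=normalize1v(p[i])
--     while p != [[0]] and p[-1] == [0]:
--         p.pop(-1)
--     m=len(p[0])
--     n=len(p)
--     for k in range (n):
--         m=max (m, len(p[k]))
--     for i in range (n):
--         l=len(p[i])
--         while l<m:
--             p[i].append(0)
--             l=len(p[i])
--     return p
--
-- def somme2v (pol1,pol2):
--     p=copy.deepcopy(pol1)
--     q=copy.deepcopy(pol2)
--     n=len(p)
--     m=len(q)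
--     if n<m :
--         s=copy.deepcopy(q)
--         for i in range (n):
--             s[i]=somme1v(p[i],q[i])
--     else:
--         s=copy.deepcopy(p)
--         for i in range (m):
--             s[i]=somme1v(p[i],q[i])
--     return normalize2v(s)
-- ===== SOURCE B (Python) =====
-- def somme2v(pol1, pol2):
--     # Bounding-box approach: treat the sum as a coefficient function c(i, j),
--     # scan backwards to find the extent of nonzero coefficients (min 1x1),
--     # then materialize the matrix directly. Inputs are never mutated.
--     def c(i, j):
--         a = pol1[i][j] if i < len(pol1) and j < len(pol1[i]) else 0
--         b = pol2[i][j] if i < len(pol2) and j < len(pol2[i]) else 0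
--         return a + b
--     R = max(len(pol1), len(pol2))
--     C = max((len(r) for r in pol1 + pol2), default=0)
--     nrows = 1
--     for i in range(R - 1, 0, -1):
--         if any(c(i, j) != 0 for j in range(C)):
--             nrows = i + 1
--             break
--     ncols = 1
--     for j in range(C - 1, 0, -1):
--         if any(c(i, j) != 0 for i in range(nrows)):
--             ncols = j + 1
--             break
--     return [[c(i, j) for j in range(ncols)] for i in range(nrows)]
-- ===== Notes on version B (the rewrite author's own statement) =====
-- stated objective: alternative
-- what changed: Replaces A's mutate-and-normalize pipeline (per-row somme1v additions, trailing-zero stripping loops, trailing-row popping, padding) by a bounding-box algorithm: a coefficient accessor c(i,j) over both inputs, two backward scans that locate the last nonzero row and column (min 1x1), and one comprehension that materializes the matrix directly.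
import Mathlib
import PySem

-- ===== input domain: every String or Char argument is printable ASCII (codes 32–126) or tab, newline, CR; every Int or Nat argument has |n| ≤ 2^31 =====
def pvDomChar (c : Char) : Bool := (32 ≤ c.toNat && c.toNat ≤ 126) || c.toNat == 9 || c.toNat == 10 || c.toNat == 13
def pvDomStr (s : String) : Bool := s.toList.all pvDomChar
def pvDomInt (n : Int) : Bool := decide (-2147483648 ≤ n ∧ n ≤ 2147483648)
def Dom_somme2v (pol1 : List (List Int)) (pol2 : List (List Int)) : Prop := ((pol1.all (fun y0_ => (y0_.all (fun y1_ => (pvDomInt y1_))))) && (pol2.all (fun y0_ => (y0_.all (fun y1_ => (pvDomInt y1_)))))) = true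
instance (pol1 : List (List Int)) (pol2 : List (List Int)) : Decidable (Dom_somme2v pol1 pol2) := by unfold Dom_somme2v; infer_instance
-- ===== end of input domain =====

-- B replaces A's mutate-and-normalize pipeline by a bounding-box algorithm: a coefficient
-- accessor plus two backward scans locating the last nonzero row/column, then one
-- comprehension materializing the matrix (objective: alternative).
-- Neither version mutates its arguments (A deepcopies, B builds fresh lists).

-- ===== PORT A =====
-- while s[-1]==0 and len(s)>1: s.pop()
def normalize1v (pol1 : List Int) : List Int :=
  if pol1.getLast? = some 0 ∧ 1 < pol1.length then normalize1v pol1.dropLast else pol1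
termination_by pol1.length
decreasing_by simp [List.length_dropLast]; omega

-- somme1v: normalize both, add the shorter onto the longer in place (ties take q1)
def somme1v (pol1 : List Int) (pol2 : List Int) : List Int :=
  let p1 := normalize1v pol1
  let q1 := normalize1v pol2
  if q1.length < p1.length then
    (List.range q1.length).foldl (fun s i => s.set i (s.getD i 0 + pol2.getD i 0)) p1
  else
    (List.range p1.length).foldl (fun s i => s.set i (s.getD i 0 + pol1.getD i 0)) q1

-- while p != [[0]] and p[-1] == [0]: p.pop(-1)
def popLoopA (p : List (List Int)) : List (List Int) :=
  if p ≠ [[0]] ∧ p.getLast? = some [0] then popLoopA p.dropLast else p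
termination_by p.length
decreasing_by
  rename_i h
  have : p ≠ [] := by intro hn; simp [hn] at h
  simp [List.length_dropLast]
  cases p <;> simp_all

-- while l<m: p[i].append(0)
def padLoopA (l : List Int) (m : Nat) : List Int :=
  if l.length < m then padLoopA (l ++ [0]) m else l
termination_by m - l.length
decreasing_by simp; omega

def normalize2v (pol : List (List Int)) : List (List Int) :=
  let p := pol.map normalize1v
  let p2 := popLoopA p
  let m := p2.foldl (fun m r => max m r.length) (p2.headD []).length
  p2.map (fun r => padLoopA r m)

def somme2v (pol1 : List (List Int)) (pol2 : List (List Int)) : List (List Int) :=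
  if pol1.length < pol2.length then
    normalize2v ((List.range pol1.length).foldl
      (fun s i => s.set i (somme1v (pol1.getD i []) (pol2.getD i []))) pol2)
  else
    normalize2v ((List.range pol2.length).foldl
      (fun s i => s.set i (somme1v (pol1.getD i []) (pol2.getD i []))) pol1)

-- ===== PORT B =====
-- def c(i, j): pol1[i][j] if in range else 0, plus the same for pol2
def coefB (pol1 pol2 : List (List Int)) (i j : Nat) : Int :=
  (if i < pol1.length ∧ j < (pol1.getD i []).length then (pol1.getD i []).getD j 0 else 0)
  + (if i < pol2.length ∧ j < (pol2.getD i []).length then (pol2.getD i []).getD j 0 else 0)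

-- 'for i in <descending indices>: if f i: return i+1; break' with default 1
def scanDown (f : Nat → Bool) : List Nat → Nat
  | [] => 1
  | i :: t => if f i then i + 1 else scanDown f t

def somme2v_alt (pol1 : List (List Int)) (pol2 : List (List Int)) : List (List Int) :=
  let R := max pol1.length pol2.length
  let C := (pol1 ++ pol2).foldl (fun m r => max m r.length) 0
  -- for i in range(R-1, 0, -1): if any(c(i,j) != 0 for j in range(C)): nrows = i+1; break
  let nrows := scanDown (fun i => (List.range C).any (fun j => coefB pol1 pol2 i j != 0))
    ((List.range' 1 (R - 1)).reverse)
  -- for j in range(C-1, 0, -1): if any(c(i,j) != 0 for i in range(nrows)): ncols = j+1; break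
  let ncols := scanDown (fun j => (List.range nrows).any (fun i => coefB pol1 pol2 i j != 0))
    ((List.range' 1 (C - 1)).reverse)
  (List.range nrows).map (fun i => (List.range ncols).map (fun j => coefB pol1 pol2 i j))

-- ===== PRECONDITION & SPEC =====
-- Pre_ excludes exactly the inputs on which Python A raises IndexError:
-- both polynomials empty, or some row empty (normalize1v reads s[-1]).
def Pre_somme2v (pol1 : List (List Int)) (pol2 : List (List Int)) : Prop :=
  (pol1 ≠ [] ∨ pol2 ≠ []) ∧ (∀ r ∈ pol1, r ≠ []) ∧ (∀ r ∈ pol2, r ≠ [])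
instance (pol1 : List (List Int)) (pol2 : List (List Int)) : Decidable (Pre_somme2v pol1 pol2) := by
  unfold Pre_somme2v; infer_instance
def pvWitness_somme2v : List (List Int) × List (List Int) := ([[1, 2], [3]], [[0, 1]])

def Spec_somme2v (pol1 : List (List Int)) (pol2 : List (List Int)) (out : List (List Int)) : Prop := out = somme2v_alt pol1 pol2
instance (pol1 : List (List Int)) (pol2 : List (List Int)) (out : List (List Int)) : Decidable (Spec_somme2v pol1 pol2 out) := by unfold Spec_somme2v; infer_instance

-- ===== CLAIM (what is proved, stated in full; the proofs are below) =====
def Claim_equal_somme2v : Prop := ∀ (pol1 : List (List Int)) (pol2 : List (List Int)), Dom_somme2v pol1 pol2 → Pre_somme2v pol1 pol2 → Spec_somme2v pol1 pol2 (somme2v pol1 pol2)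

-- ===== LEMMAS AND PROOFS =====

-- The canonical form both programs are reduced to: strip each summed row,
-- pop trailing [0] rows, pad to the maximal row length.
def rowSum : List Int → List Int → List Int
  | [], [] => []
  | a :: t1, [] => (a + 0) :: rowSum t1 []
  | [], b :: t2 => (0 + b) :: rowSum [] t2
  | a :: t1, b :: t2 => (a + b) :: rowSum t1 t2

def stripRow (row : List Int) : List Int :=
  if 1 < row.length ∧ row.getLast? = some 0 then stripRow row.dropLast else row
termination_by row.length
decreasing_by simp [List.length_dropLast]; omega

def sumRows : List (List Int) → List (List Int) → List (List Int)
  | [], [] => []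
  | r :: t, [] => stripRow (rowSum r []) :: sumRows t []
  | [], r :: t => stripRow (rowSum [] r) :: sumRows [] t
  | r1 :: t1, r2 :: t2 => stripRow (rowSum r1 r2) :: sumRows t1 t2

def popTail (rows : List (List Int)) : List (List Int) :=
  if rows ≠ [[0]] ∧ rows ≠ [] ∧ rows.getLast? = some [0] then popTail rows.dropLast else rows
termination_by rows.length
decreasing_by
  rename_i h
  simp [List.length_dropLast]
  cases rows <;> simp_all

def canon2v (pol1 : List (List Int)) (pol2 : List (List Int)) : List (List Int) :=
  let rows := popTail (sumRows pol1 pol2)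
  let m := rows.foldl (fun m r => max m r.length) 0
  rows.map (fun r => r ++ List.replicate (m - r.length) 0)

theorem normalize1v_eq_stripRow (l : List Int) : normalize1v l = stripRow l := by
  by_cases h : 1 < l.length ∧ l.getLast? = some 0
  · rw [normalize1v, stripRow, if_pos ⟨h.2, h.1⟩, if_pos h]
    exact normalize1v_eq_stripRow l.dropLast
  · rw [normalize1v, stripRow, if_neg (by tauto), if_neg h]
termination_by l.length
decreasing_by simp [List.length_dropLast]; omega

theorem stripRow_append_zeros_ex (l : List Int) : ∃ k, l = stripRow l ++ List.replicate k 0 := by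
  by_cases h : 1 < l.length ∧ l.getLast? = some 0
  · obtain ⟨k, hk⟩ := stripRow_append_zeros_ex l.dropLast
    refine ⟨k + 1, ?_⟩
    rw [stripRow, if_pos h]
    have hne : l ≠ [] := by intro hn; simp [hn] at h
    have : l.dropLast ++ [l.getLast hne] = l := List.dropLast_append_getLast hne
    have hlast : l.getLast hne = 0 := by
      have := h.2; rw [List.getLast?_eq_getLast hne] at this; exact Option.some.inj this
    calc l = l.dropLast ++ [0] := by rw [← hlast, this]
      _ = (stripRow l.dropLast ++ List.replicate k 0) ++ [0] := by rw [← hk]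
      _ = stripRow l.dropLast ++ List.replicate (k + 1) 0 := by
            rw [List.replicate_succ' ,List.append_assoc]
  · exact ⟨0, by rw [stripRow, if_neg h]; simp⟩
termination_by l.length
decreasing_by simp [List.length_dropLast]; omega

theorem stripRow_ne_nil (l : List Int) (h : l ≠ []) : stripRow l ≠ [] := by
  by_cases hc : 1 < l.length ∧ l.getLast? = some 0
  · rw [stripRow, if_pos hc]
    exact stripRow_ne_nil l.dropLast (by
      intro hn
      have := hc.1
      have : l.dropLast.length = 0 := by rw [hn]; rfl
      simp [List.length_dropLast] at this
      omega)
  · rw [stripRow, if_neg hc]; exact h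
termination_by l.length
decreasing_by simp [List.length_dropLast]; omega

theorem stripRow_append_zeros (l : List Int) (h : l ≠ []) (k : Nat) :
    stripRow (l ++ List.replicate k 0) = stripRow l := by
  induction k with
  | zero => simp
  | succ k ih =>
    have h1 : l ++ List.replicate (k + 1) 0 = (l ++ List.replicate k 0) ++ [0] := by
      rw [List.replicate_succ', ← List.append_assoc]
    rw [h1, stripRow, if_pos, List.dropLast_concat]
    · exact ih
    · constructor
      · simp
        have : l.length ≠ 0 := by simpa [List.length_eq_zero_iff] using h
        omega
      · exact List.getLast?_concat

-- generic extensionality via getD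
theorem ext_getD {α : Type} (d : α) {l1 l2 : List α} (hlen : l1.length = l2.length)
    (hg : ∀ i, l1.getD i d = l2.getD i d) : l1 = l2 := by
  apply List.ext_getElem hlen
  intro i h1 h2
  have := hg i
  rwa [List.getD_eq_getElem l1 d h1, List.getD_eq_getElem l2 d h2] at this

theorem getD_append_zeros (s : List Int) (k : Nat) (i : Nat) :
    (s ++ List.replicate k 0).getD i 0 = s.getD i 0 := by
  induction s generalizing i with
  | nil =>
    simp only [List.nil_append, List.getD_nil]
    rcases Nat.lt_or_ge i k with h | h
    · rw [List.getD_eq_getElem _ _ (by simpa using h)]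
      simp
    · exact List.getD_eq_default _ _ (by simpa using h)
  | cons a t ih =>
    cases i with
    | zero => simp
    | succ i => simpa using ih i

theorem rowSum_length (r1 r2 : List Int) : (rowSum r1 r2).length = max r1.length r2.length := by
  induction r1, r2 using rowSum.induct with
  | case1 => simp [rowSum]
  | case2 a t1 ih => simp [rowSum, ih]
  | case3 b t2 ih => simp [rowSum, ih]
  | case4 a t1 b t2 ih => simp [rowSum, ih]

theorem rowSum_getD (r1 r2 : List Int) (i : Nat) :
    (rowSum r1 r2).getD i 0 = r1.getD i 0 + r2.getD i 0 := by
  induction r1, r2 using rowSum.induct generalizing i with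
  | case1 => simp [rowSum]
  | case2 a t1 ih =>
    cases i with
    | zero => simp [rowSum]
    | succ i =>
      simp only [rowSum, List.getD_cons_succ, List.getD_nil]
      simpa using ih i
  | case3 b t2 ih =>
    cases i with
    | zero => simp [rowSum]
    | succ i =>
      simp only [rowSum, List.getD_cons_succ, List.getD_nil]
      simpa using ih i
  | case4 a t1 b t2 ih =>
    cases i with
    | zero => simp [rowSum]
    | succ i =>
      simp only [rowSum, List.getD_cons_succ]
      exact ih i

theorem rowSum_nil_right (r : List Int) : rowSum r [] = r := by
  induction r with
  | nil => simp [rowSum]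
  | cons a t ih => simpa [rowSum] using ih

theorem rowSum_nil_left (r : List Int) : rowSum [] r = r := by
  induction r with
  | nil => simp [rowSum]
  | cons a t ih => simpa [rowSum] using ih

theorem pv_getD_set_ne {α : Type} (d : α) (l : List α) (v : α) {j i : Nat} (h : j ≠ i) :
    (l.set j v).getD i d = l.getD i d := by
  simp [List.getD_eq_getElem?_getD, h]

theorem pv_getD_set_self {α : Type} (d : α) (l : List α) (v : α) {j : Nat} (h : j < l.length) :
    (l.set j v).getD j d = v := by
  simp [List.getD_eq_getElem?_getD, h]

-- the somme1v in-place addition fold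
theorem fold1_length (m : Nat) (a c : List Int) :
    ((List.range m).foldl (fun s i => s.set i (s.getD i 0 + c.getD i 0)) a).length = a.length := by
  induction m with
  | zero => rfl
  | succ m ih =>
    rw [List.range_succ, List.foldl_append]
    simp only [List.foldl_cons, List.foldl_nil, List.length_set]
    exact ih

theorem fold1_getD (m : Nat) (a c : List Int) (hm : m ≤ a.length) (i : Nat) :
    ((List.range m).foldl (fun s i => s.set i (s.getD i 0 + c.getD i 0)) a).getD i 0 =
      if i < m then a.getD i 0 + c.getD i 0 else a.getD i 0 := by
  induction m generalizing i with
  | zero => simp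
  | succ m ih =>
    rw [List.range_succ, List.foldl_append]
    simp only [List.foldl_cons, List.foldl_nil]
    rcases Nat.lt_trichotomy i m with h | h | h
    · rw [pv_getD_set_ne _ _ _ (by omega)]
      rw [ih (by omega) i]
      simp [h, Nat.lt_succ_of_lt h]
    · subst h
      rw [pv_getD_set_self _ _ _ (by rw [fold1_length]; omega)]
      rw [ih (by omega) i]
      simp
    · rw [pv_getD_set_ne _ _ _ (by omega)]
      rw [ih (by omega) i]
      have h1 : ¬ i < m := by omega
      have h2 : ¬ i < m + 1 := by omega
      simp [h1, h2]

theorem somme1v_eq (r1 r2 : List Int) :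
    somme1v r1 r2 = rowSum (normalize1v r1) (normalize1v r2) := by
  obtain ⟨j, hj⟩ := stripRow_append_zeros_ex r1
  obtain ⟨k, hk⟩ := stripRow_append_zeros_ex r2
  rw [normalize1v_eq_stripRow r1, normalize1v_eq_stripRow r2] at *
  set p1 := stripRow r1 with hp1
  set q1 := stripRow r2 with hq1
  have hr1 : ∀ i, r1.getD i 0 = p1.getD i 0 := by
    intro i; conv_lhs => rw [hj]
    exact getD_append_zeros _ _ _
  have hr2 : ∀ i, r2.getD i 0 = q1.getD i 0 := by
    intro i; conv_lhs => rw [hk]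
    exact getD_append_zeros _ _ _
  rw [somme1v]
  simp only [normalize1v_eq_stripRow, ← hp1, ← hq1]
  split_ifs with hlt
  · apply ext_getD 0
    · rw [fold1_length, rowSum_length]; omega
    · intro i
      rw [fold1_getD _ _ _ (by omega) i, rowSum_getD]
      split_ifs with hi
      · rw [hr2]
      · have : q1.getD i 0 = 0 := List.getD_eq_default _ _ (by omega)
        rw [this]; ring
  · apply ext_getD 0
    · rw [fold1_length, rowSum_length]; omega
    · intro i
      rw [fold1_getD _ _ _ (by omega) i, rowSum_getD]
      split_ifs with hi
      · rw [hr1]; ring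
      · have : p1.getD i 0 = 0 := List.getD_eq_default _ _ (by omega)
        rw [this]; ring

-- the per-row agreement: A's normalized row sum = the canonical stripped sum
theorem row_eq (r1 r2 : List Int) (h1 : r1 ≠ []) (h2 : r2 ≠ []) :
    normalize1v (somme1v r1 r2) = stripRow (rowSum r1 r2) := by
  obtain ⟨j, hj⟩ := stripRow_append_zeros_ex r1
  obtain ⟨k, hk⟩ := stripRow_append_zeros_ex r2
  set p1 := stripRow r1 with hp1
  set q1 := stripRow r2 with hq1
  have hp1ne : p1 ≠ [] := stripRow_ne_nil r1 h1
  have hq1ne : q1 ≠ [] := stripRow_ne_nil r2 h2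
  have hcore : ∀ i, (rowSum r1 r2).getD i 0 = (rowSum p1 q1).getD i 0 := by
    intro i
    rw [rowSum_getD, rowSum_getD]
    conv_lhs => rw [hj, hk]
    rw [getD_append_zeros, getD_append_zeros]
  have hlen : (rowSum p1 q1).length ≤ (rowSum r1 r2).length := by
    rw [rowSum_length, rowSum_length]
    have : p1.length ≤ r1.length := by rw [hj]; simp
    have : q1.length ≤ r2.length := by rw [hk]; simp
    omega
  have hsplit : rowSum r1 r2 = rowSum p1 q1 ++ List.replicate ((rowSum r1 r2).length - (rowSum p1 q1).length) 0 := by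
    apply ext_getD 0
    · simp; omega
    · intro i
      rw [hcore i, getD_append_zeros]
  have hne : rowSum p1 q1 ≠ [] := by
    intro hn
    have hL := rowSum_length p1 q1
    rw [hn] at hL
    simp only [List.length_nil] at hL
    have : p1.length = 0 := by omega
    exact hp1ne (List.length_eq_zero_iff.mp this)
  rw [normalize1v_eq_stripRow, somme1v_eq r1 r2,
      normalize1v_eq_stripRow, normalize1v_eq_stripRow, ← hp1, ← hq1]
  conv_rhs => rw [hsplit]
  rw [stripRow_append_zeros _ hne]

-- the outer fold of somme2v
theorem fold2_length (m : Nat) (base : List (List Int)) (g : Nat → List Int) :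
    ((List.range m).foldl (fun s i => s.set i (g i)) base).length = base.length := by
  induction m with
  | zero => rfl
  | succ m ih =>
    rw [List.range_succ, List.foldl_append]
    simp only [List.foldl_cons, List.foldl_nil, List.length_set]
    exact ih

theorem fold2_getD (m : Nat) (base : List (List Int)) (g : Nat → List Int) (hm : m ≤ base.length) (i : Nat) :
    ((List.range m).foldl (fun s i => s.set i (g i)) base).getD i [] =
      if i < m then g i else base.getD i [] := by
  induction m generalizing i with
  | zero => simp
  | succ m ih =>
    rw [List.range_succ, List.foldl_append]
    simp only [List.foldl_cons, List.foldl_nil]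
    rcases Nat.lt_trichotomy i m with h | h | h
    · rw [pv_getD_set_ne _ _ _ (by omega), ih (by omega) i]
      simp [h, Nat.lt_succ_of_lt h]
    · subst h
      rw [pv_getD_set_self _ _ _ (by rw [fold2_length]; omega)]
      simp
    · rw [pv_getD_set_ne _ _ _ (by omega), ih (by omega) i]
      have h1 : ¬ i < m := by omega
      have h2 : ¬ i < m + 1 := by omega
      simp [h1, h2]

theorem sumRows_length (p q : List (List Int)) : (sumRows p q).length = max p.length q.length := by
  induction p, q using sumRows.induct with
  | case1 => simp [sumRows]
  | case2 r t ih => simp [sumRows, ih]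
  | case3 r t ih => simp [sumRows, ih]
  | case4 r1 t1 r2 t2 ih => simp [sumRows, ih]

theorem sumRows_getD (p q : List (List Int)) (i : Nat) (hi : i < max p.length q.length) :
    (sumRows p q).getD i [] = stripRow (rowSum (p.getD i []) (q.getD i [])) := by
  induction p, q using sumRows.induct generalizing i with
  | case1 => simp at hi
  | case2 r t ih =>
    cases i with
    | zero => simp [sumRows]
    | succ i =>
      simp only [sumRows, List.getD_cons_succ, List.getD_nil]
      have := ih i (by simp at hi ⊢; omega)
      simpa using this
  | case3 r t ih =>
    cases i with
    | zero => simp [sumRows]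
    | succ i =>
      simp only [sumRows, List.getD_cons_succ, List.getD_nil]
      have := ih i (by simp at hi ⊢; omega)
      simpa using this
  | case4 r1 t1 r2 t2 ih =>
    cases i with
    | zero => simp [sumRows]
    | succ i =>
      simp only [sumRows, List.getD_cons_succ]
      exact ih i (by simp at hi ⊢; omega)

theorem popLoopA_eq_popTail (p : List (List Int)) : popLoopA p = popTail p := by
  by_cases h : p ≠ [[0]] ∧ p.getLast? = some [0]
  · have hne : p ≠ [] := by intro hn; simp [hn] at h
    rw [popLoopA, if_pos h, popTail, if_pos ⟨h.1, hne, h.2⟩]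
    exact popLoopA_eq_popTail p.dropLast
  · rw [popLoopA, if_neg h, popTail, if_neg (by tauto)]
termination_by p.length
decreasing_by
  rename_i h
  have : p ≠ [] := by intro hn; simp [hn] at h
  simp [List.length_dropLast]; cases p <;> simp_all

theorem popLoopA_ne_nil (p : List (List Int)) (h : p ≠ []) : popLoopA p ≠ [] := by
  by_cases hc : p ≠ [[0]] ∧ p.getLast? = some [0]
  · rw [popLoopA, if_pos hc]
    apply popLoopA_ne_nil
    intro hn
    have hl : p.length ≤ 1 := by
      have := congrArg List.length hn
      simp [List.length_dropLast] at this
      omega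
    match p, hl with
    | [x], _ =>
      have : x = [0] := by simpa using hc.2
      exact hc.1 (by rw [this])
  · rw [popLoopA, if_neg hc]; exact h
termination_by p.length
decreasing_by
  rename_i hc
  have : p ≠ [] := by intro hn; simp [hn] at hc
  simp [List.length_dropLast]; cases p <;> simp_all

theorem maxfold_eq (p : List (List Int)) (_h : p ≠ []) :
    p.foldl (fun m r => max m r.length) (p.headD []).length =
    p.foldl (fun m r => max m r.length) 0 := by
  match p with
  | x :: t => simp

theorem padLoopA_eq (l : List Int) (m : Nat) :
    padLoopA l m = l ++ List.replicate (m - l.length) 0 := by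
  by_cases h : l.length < m
  · rw [padLoopA, if_pos h, padLoopA_eq (l ++ [0]) m]
    have : m - l.length = (m - (l.length + 1)) + 1 := by omega
    rw [this, List.append_assoc]
    congr 1
    simp [List.replicate_succ]
  · rw [padLoopA, if_neg h]
    have : m - l.length = 0 := by omega
    simp [this]
termination_by m - l.length
decreasing_by simp; omega

-- the mapped rows of A's s coincide with the canonical sumRows
theorem mapped_rows_eq (pol1 pol2 : List (List Int))
    (h1 : ∀ r ∈ pol1, r ≠ []) (h2 : ∀ r ∈ pol2, r ≠ []) :
    ∀ (base : List (List Int)) (m : Nat),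
      m = min pol1.length pol2.length →
      base.length = max pol1.length pol2.length →
      (∀ i, m ≤ i → base.getD i [] = pol1.getD i [] ++ pol2.getD i []) →
      (((List.range m).foldl (fun s i => s.set i (somme1v (pol1.getD i []) (pol2.getD i []))) base).map
        normalize1v) = sumRows pol1 pol2 := by
  intro base m hm hbase htail
  apply ext_getD []
  · rw [List.length_map, fold2_length, sumRows_length, hbase]
  · intro i
    by_cases hi : i < max pol1.length pol2.length
    · have hmap : ∀ (l : List (List Int)) (j : Nat), j < l.length → (l.map normalize1v).getD j [] = normalize1v (l.getD j []) := by
        intro l j hj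
        rw [List.getD_eq_getElem _ _ (by simpa using hj), List.getD_eq_getElem _ _ hj]
        simp
      rw [hmap _ i (by rw [fold2_length, hbase]; exact hi)]
      rw [fold2_getD _ _ _ (by rw [hbase]; omega) i]
      rw [sumRows_getD _ _ i hi]
      split_ifs with him
      · have hi1 : i < pol1.length := by omega
        have hi2 : i < pol2.length := by omega
        apply row_eq
        · exact h1 _ (by rw [List.getD_eq_getElem _ _ hi1]; exact List.getElem_mem hi1)
        · exact h2 _ (by rw [List.getD_eq_getElem _ _ hi2]; exact List.getElem_mem hi2)
      · rw [htail i (by omega)]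
        have : pol1.getD i [] = [] ∨ pol2.getD i [] = [] := by
          rcases Nat.le_total pol1.length pol2.length with hle | hle
          · left; exact List.getD_eq_default _ _ (by omega)
          · right; exact List.getD_eq_default _ _ (by omega)
        rcases this with hnil | hnil
        · rw [hnil, List.nil_append, normalize1v_eq_stripRow, rowSum_nil_left]
        · rw [hnil, List.append_nil, normalize1v_eq_stripRow, rowSum_nil_right]
    · rw [List.getD_eq_default _ _ (by rw [List.length_map, fold2_length, hbase]; omega),
          List.getD_eq_default _ _ (by rw [sumRows_length]; omega)]

theorem somme2v_eq_canon (pol1 pol2 : List (List Int)) (hpre : Pre_somme2v pol1 pol2) :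
    somme2v pol1 pol2 = canon2v pol1 pol2 := by
  obtain ⟨hnn, h1, h2⟩ := hpre
  have hrows : ∀ s, s.map normalize1v = sumRows pol1 pol2 → normalize2v s = canon2v pol1 pol2 := by
    intro s hs
    rw [normalize2v, canon2v]
    simp only [hs, popLoopA_eq_popTail]
    have hne : popTail (sumRows pol1 pol2) ≠ [] := by
      rw [← popLoopA_eq_popTail]
      apply popLoopA_ne_nil
      intro hn
      have hL := sumRows_length pol1 pol2
      rw [hn] at hL
      simp only [List.length_nil] at hL
      rcases hnn with h | h
      · exact h (List.length_eq_zero_iff.mp (by omega))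
      · exact h (List.length_eq_zero_iff.mp (by omega))
    rw [maxfold_eq _ hne]
    apply List.map_congr_left
    intro r _
    rw [padLoopA_eq]
  rw [somme2v]
  split_ifs with hlt
  · apply hrows
    apply mapped_rows_eq pol1 pol2 h1 h2 pol2 pol1.length (by omega) (by omega)
    intro i him
    rw [List.getD_eq_default (l := pol1) _ (by omega), List.nil_append]
  · apply hrows
    apply mapped_rows_eq pol1 pol2 h1 h2 pol1 pol2.length (by omega) (by omega)
    intro i him
    rw [List.getD_eq_default (l := pol2) _ (by omega), List.append_nil]

-- ======= canon2v = somme2v_alt =======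

theorem coefB_eq (pol1 pol2 : List (List Int)) (i j : Nat) :
    coefB pol1 pol2 i j = (pol1.getD i []).getD j 0 + (pol2.getD i []).getD j 0 := by
  unfold coefB
  congr 1
  · split_ifs with h
    · rfl
    · push_neg at h
      by_cases hi : i < pol1.length
      · exact (List.getD_eq_default _ _ (h hi)).symm
      · rw [List.getD_eq_default pol1 _ (by omega)]; rfl
  · split_ifs with h
    · rfl
    · push_neg at h
      by_cases hi : i < pol2.length
      · exact (List.getD_eq_default _ _ (h hi)).symm
      · rw [List.getD_eq_default pol2 _ (by omega)]; rfl

theorem foldl_max_spec (l : List (List Int)) (a : Nat) :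
    a ≤ l.foldl (fun m r => max m r.length) a ∧
    (∀ r ∈ l, r.length ≤ l.foldl (fun m r => max m r.length) a) ∧
    (l.foldl (fun m r => max m r.length) a = a ∨ ∃ r ∈ l, l.foldl (fun m r => max m r.length) a = r.length) := by
  induction l generalizing a with
  | nil => exact ⟨le_refl _, by simp, Or.inl rfl⟩
  | cons r t ih =>
    obtain ⟨hle, hall, hlast⟩ := ih (max a r.length)
    simp only [List.foldl_cons]
    refine ⟨le_trans (le_max_left _ _) hle, ?_, ?_⟩
    · intro s hs
      rcases List.mem_cons.mp hs with rfl | hs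
      · exact le_trans (le_max_right _ _) hle
      · exact hall s hs
    · rcases hlast with h | ⟨s, hs, h⟩
      · rcases max_choice a r.length with hm | hm
        · left; rw [h, hm]
        · right; exact ⟨r, List.mem_cons_self, by rw [h, hm]⟩
      · right; exact ⟨s, List.mem_cons_of_mem _ hs, h⟩

theorem scanDown_spec (f : Nat → Bool) (k : Nat) :
    1 ≤ scanDown f ((List.range' 1 k).reverse) ∧
    scanDown f ((List.range' 1 k).reverse) ≤ k + 1 ∧
    (∀ i, scanDown f ((List.range' 1 k).reverse) ≤ i → i ≤ k → f i = false) ∧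
    (scanDown f ((List.range' 1 k).reverse) = 1 ∨ f (scanDown f ((List.range' 1 k).reverse) - 1) = true) := by
  induction k with
  | zero =>
    have hz : scanDown f ((List.range' 1 0).reverse) = 1 := rfl
    rw [hz]
    exact ⟨le_refl 1, by omega, fun i h1 h2 => by omega, Or.inl rfl⟩
  | succ k ih =>
    have hsplit : (List.range' 1 (k + 1)).reverse = (k + 1) :: (List.range' 1 k).reverse := by
      rw [List.range'_concat]
      simp [Nat.add_comm]
    rw [hsplit]
    simp only [scanDown]
    by_cases hf : f (k + 1)
    · rw [if_pos hf]
      refine ⟨by omega, by omega, fun i h1 h2 => by omega, Or.inr (by simpa using hf)⟩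
    · rw [if_neg hf]
      obtain ⟨i1, i2, i3, i4⟩ := ih
      refine ⟨i1, by omega, ?_, i4⟩
      intro i hge hle
      rcases Nat.lt_or_ge i (k + 1) with h | h
      · exact i3 i hge (by omega)
      · have : i = k + 1 := by omega
        rw [this]
        simpa using hf

-- stripRow is a prefix of its argument, so its length is bounded
theorem stripRow_length_le (l : List Int) : (stripRow l).length ≤ l.length := by
  obtain ⟨k, hk⟩ := stripRow_append_zeros_ex l
  conv_rhs => rw [hk]
  simp

-- the final strip step leaves nothing strippable
theorem stripRow_no_strip (l : List Int) :
    ¬ (1 < (stripRow l).length ∧ (stripRow l).getLast? = some 0) := by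
  by_cases h : 1 < l.length ∧ l.getLast? = some 0
  · rw [stripRow, if_pos h]
    exact stripRow_no_strip l.dropLast
  · rw [stripRow, if_neg h]
    exact h
termination_by l.length
decreasing_by simp [List.length_dropLast]; omega

theorem stripRow_getD (l : List Int) (j : Nat) : l.getD j 0 = (stripRow l).getD j 0 := by
  obtain ⟨k, hk⟩ := stripRow_append_zeros_ex l
  conv_lhs => rw [hk]
  exact getD_append_zeros _ _ _

theorem stripRow_beyond (l : List Int) (j : Nat) (h : (stripRow l).length ≤ j) :
    l.getD j 0 = 0 := by
  rw [stripRow_getD]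
  exact List.getD_eq_default _ _ h

theorem stripRow_last (l : List Int) (h : l ≠ []) :
    (stripRow l).length = 1 ∨ l.getD ((stripRow l).length - 1) 0 ≠ 0 := by
  have hne := stripRow_ne_nil l h
  have hlen : 1 ≤ (stripRow l).length := by
    have := List.length_pos_iff.mpr hne; omega
  by_cases h1 : (stripRow l).length = 1
  · exact Or.inl h1
  · right
    have hlt : 1 < (stripRow l).length := by omega
    have hlast : (stripRow l).getLast? ≠ some 0 := by
      intro hc; exact stripRow_no_strip l ⟨hlt, hc⟩
    rw [stripRow_getD]
    intro hc
    apply hlast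
    rw [List.getLast?_eq_getElem?, List.getElem?_eq_getElem (by omega)]
    rw [List.getD_eq_getElem _ _ (by omega)] at hc
    rw [hc]

theorem stripRow_zero_iff (l : List Int) (h : l ≠ []) :
    stripRow l = [0] ↔ ∀ j, l.getD j 0 = 0 := by
  constructor
  · intro hs j
    rw [stripRow_getD, hs]
    cases j with
    | zero => rfl
    | succ j => rfl
  · intro hz
    rcases stripRow_last l h with h1 | h1
    · obtain ⟨a, ha⟩ := List.length_eq_one_iff.mp h1
      have : a = 0 := by
        have := hz 0
        rw [stripRow_getD, ha] at this
        simpa using this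
      rw [ha, this]
    · exact absurd (hz _) h1

theorem getLast?_getD {α : Type} (d : α) (l : List α) (h : l ≠ []) :
    l.getLast? = some (l.getD (l.length - 1) d) := by
  have hp := List.length_pos_iff.mpr h
  rw [List.getLast?_eq_getElem?, List.getElem?_eq_getElem (by omega),
      List.getD_eq_getElem _ _ (by omega)]

-- getD through a list prefix
theorem prefix_getD {α : Type} (d : α) {l t : List α} (h : l <+: t) {i : Nat}
    (hi : i < l.length) : t.getD i d = l.getD i d := by
  obtain ⟨s, rfl⟩ := h
  rw [List.getD_eq_getElem _ _ (by simp; omega), List.getD_eq_getElem _ _ hi]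
  exact List.getElem_append_left hi

theorem popTail_prefix (xs : List (List Int)) : popTail xs <+: xs := by
  by_cases h : xs ≠ [[0]] ∧ xs ≠ [] ∧ xs.getLast? = some [0]
  · rw [popTail, if_pos h]
    exact (popTail_prefix xs.dropLast).trans (List.dropLast_prefix xs)
  · rw [popTail, if_neg h]
termination_by xs.length
decreasing_by
  rename_i h
  simp [List.length_dropLast]
  cases xs <;> simp_all

theorem popTail_dropped (xs : List (List Int)) :
    ∀ i, (popTail xs).length ≤ i → i < xs.length → xs.getD i [] = [0] := by
  by_cases h : xs ≠ [[0]] ∧ xs ≠ [] ∧ xs.getLast? = some [0]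
  · rw [popTail, if_pos h]
    intro i hge hlt
    by_cases hi : i < xs.dropLast.length
    · have hd := popTail_dropped xs.dropLast i hge hi
      rw [prefix_getD [] (List.dropLast_prefix xs) hi]
      exact hd
    · have hxne : xs ≠ [] := h.2.1
      have hlen : 1 ≤ xs.length := by
        have := List.length_pos_iff.mpr hxne; omega
      have hieq : i = xs.length - 1 := by
        simp [List.length_dropLast] at hi; omega
      have hlast := h.2.2
      rw [List.getLast?_eq_getElem?, List.getElem?_eq_getElem (by omega)] at hlast
      rw [hieq, List.getD_eq_getElem _ _ (by omega)]
      exact Option.some.inj hlast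
  · rw [popTail, if_neg h]
    intro i h1 h2
    omega
termination_by xs.length
decreasing_by
  rename_i h
  simp [List.length_dropLast]
  cases xs <;> simp_all

theorem popTail_stop (xs : List (List Int)) :
    popTail xs = [[0]] ∨ popTail xs = [] ∨ (popTail xs).getLast? ≠ some [0] := by
  by_cases h : xs ≠ [[0]] ∧ xs ≠ [] ∧ xs.getLast? = some [0]
  · rw [popTail, if_pos h]
    exact popTail_stop xs.dropLast
  · rw [popTail, if_neg h]
    tauto
termination_by xs.length
decreasing_by
  rename_i h
  simp [List.length_dropLast]
  cases xs <;> simp_all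

theorem canon_eq_alt (pol1 pol2 : List (List Int)) (hpre : Pre_somme2v pol1 pol2) :
    canon2v pol1 pol2 = somme2v_alt pol1 pol2 := by
  obtain ⟨hnn, h1, h2⟩ := hpre
  -- notation
  set R := max pol1.length pol2.length with hR
  set C := (pol1 ++ pol2).foldl (fun m r => max m r.length) 0 with hC
  set rows := popTail (sumRows pol1 pol2) with hrowsdef
  set L := rows.length with hL
  set m := rows.foldl (fun m r => max m r.length) 0 with hm
  -- basic bounds
  have hR1 : 1 ≤ R := by
    rcases hnn with h | h
    · have := List.length_pos_iff.mpr h; omega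
    · have := List.length_pos_iff.mpr h; omega
  have hCrow : ∀ r ∈ pol1 ++ pol2, r.length ≤ C := (foldl_max_spec (pol1 ++ pol2) 0).2.1
  have hrowlen : ∀ (p : List (List Int)), (∀ r ∈ p, r.length ≤ C) → ∀ i, (p.getD i []).length ≤ C := by
    intro p hp i
    by_cases hi : i < p.length
    · rw [List.getD_eq_getElem _ _ hi]
      exact hp _ (List.getElem_mem hi)
    · rw [List.getD_eq_default _ _ (by omega)]
      exact Nat.zero_le _
  have hlen1 : ∀ i, (pol1.getD i []).length ≤ C :=
    hrowlen pol1 (fun r hr => hCrow r (List.mem_append_left _ hr))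
  have hlen2 : ∀ i, (pol2.getD i []).length ≤ C :=
    hrowlen pol2 (fun r hr => hCrow r (List.mem_append_right _ hr))
  have hC1 : 1 ≤ C := by
    rcases hnn with h | h
    · have h0 : 0 < pol1.length := List.length_pos_iff.mpr h
      have hne := h1 _ (List.getElem_mem h0)
      have := hCrow _ (List.mem_append_left _ (List.getElem_mem h0))
      have := List.length_pos_iff.mpr hne
      omega
    · have h0 : 0 < pol2.length := List.length_pos_iff.mpr h
      have hne := h2 _ (List.getElem_mem h0)
      have := hCrow _ (List.mem_append_right _ (List.getElem_mem h0))
      have := List.length_pos_iff.mpr hne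
      omega
  -- coefficient facts
  have hfC : ∀ i j, C ≤ j → coefB pol1 pol2 i j = 0 := by
    intro i j hj
    rw [coefB_eq, List.getD_eq_default _ _ (le_trans (hlen1 i) hj),
        List.getD_eq_default _ _ (le_trans (hlen2 i) hj)]
    ring
  have hgf : ∀ i j, (rowSum (pol1.getD i []) (pol2.getD i [])).getD j 0 = coefB pol1 pol2 i j := by
    intro i j
    rw [rowSum_getD, coefB_eq]
  have hgne : ∀ i, i < R → rowSum (pol1.getD i []) (pol2.getD i []) ≠ [] := by
    intro i hi hn
    have hlen := rowSum_length (pol1.getD i []) (pol2.getD i [])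
    rw [hn] at hlen
    simp only [List.length_nil] at hlen
    rcases Nat.lt_or_ge i pol1.length with hc | hc
    · have hmem : pol1.getD i [] ∈ pol1 := by
        rw [List.getD_eq_getElem _ _ hc]; exact List.getElem_mem hc
      have := List.length_pos_iff.mpr (h1 _ hmem)
      omega
    · have hc2 : i < pol2.length := by omega
      have hmem : pol2.getD i [] ∈ pol2 := by
        rw [List.getD_eq_getElem _ _ hc2]; exact List.getElem_mem hc2
      have := List.length_pos_iff.mpr (h2 _ hmem)
      omega
  -- rows facts
  have hSlen : (sumRows pol1 pol2).length = R := sumRows_length pol1 pol2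
  have hpre' : rows <+: sumRows pol1 pol2 := popTail_prefix _
  have hLR : L ≤ R := by
    have := hpre'.length_le
    omega
  have hrne : rows ≠ [] := by
    rw [hrowsdef, ← popLoopA_eq_popTail]
    apply popLoopA_ne_nil
    intro hn
    rw [hn] at hSlen
    simp at hSlen
    omega
  have hL1 : 1 ≤ L := by
    have := List.length_pos_iff.mpr hrne
    omega
  have hrget : ∀ i, i < L → rows.getD i [] = stripRow (rowSum (pol1.getD i []) (pol2.getD i [])) := by
    intro i hi
    rw [← prefix_getD [] hpre' (by omega), sumRows_getD _ _ i (by omega)]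
  -- row-count characterization of L
  have hQup : ∀ i, L ≤ i → i < R → ∀ j, coefB pol1 pol2 i j = 0 := by
    intro i hge hlt j
    have hz := popTail_dropped (sumRows pol1 pol2) i (by omega) (by omega)
    rw [sumRows_getD _ _ i (by omega)] at hz
    have := (stripRow_zero_iff _ (hgne i (by omega))).mp hz j
    rw [hgf] at this
    exact this
  have hQlast : L = 1 ∨ ∃ j, coefB pol1 pol2 (L - 1) j ≠ 0 := by
    rcases popTail_stop (sumRows pol1 pol2) with hs | hs | hs
    · left
      show rows.length = 1
      rw [show rows = [[0]] from hs]
      rfl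
    · exact absurd hs hrne
    · right
      have hlastne : rows.getD (L - 1) [] ≠ [0] := by
        intro hc
        apply hs
        show rows.getLast? = some [0]
        rw [getLast?_getD [] rows hrne]
        exact congrArg some hc
      rw [hrget (L - 1) (by omega)] at hlastne
      have hniff := (stripRow_zero_iff _ (hgne (L - 1) (by omega)))
      by_contra hcon
      push_neg at hcon
      exact hlastne (hniff.mpr (fun j => by rw [hgf (L - 1) j]; exact hcon j))
  -- scanned row count equals L
  have hnrows : scanDown (fun i => (List.range C).any (fun j => coefB pol1 pol2 i j != 0))
      ((List.range' 1 (R - 1)).reverse) = L := by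
    obtain ⟨i1, i2, i3, i4⟩ := scanDown_spec
      (fun i => (List.range C).any (fun j => coefB pol1 pol2 i j != 0)) (R - 1)
    set N := scanDown (fun i => (List.range C).any (fun j => coefB pol1 pol2 i j != 0))
      ((List.range' 1 (R - 1)).reverse) with hN
    rcases Nat.lt_trichotomy L N with hlt | heq | hlt
    · exfalso
      have hN1 : N ≠ 1 := by omega
      have htrue := i4.resolve_left hN1
      have htrue' : ∃ j, j < C ∧ coefB pol1 pol2 (N - 1) j ≠ 0 := by
        simpa [List.any_eq_true, bne_iff_ne] using htrue
      obtain ⟨j, _, hj⟩ := htrue'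
      exact hj (hQup (N - 1) (by omega) (by omega) j)
    · exact heq.symm
    · exfalso
      have hL1' : L ≠ 1 := by omega
      obtain ⟨j, hj⟩ := hQlast.resolve_left hL1'
      have hfalse := i3 (L - 1) (by omega) (by omega)
      have hjC : j < C := by
        by_contra hc
        exact hj (hfC (L - 1) j (by omega))
      have : coefB pol1 pol2 (L - 1) j = 0 := by
        have := List.any_eq_false.mp hfalse j (List.mem_range.mpr hjC)
        simpa using this
      exact hj this
  -- column-count characterization of m
  obtain ⟨_, hm_all, hm_att⟩ := foldl_max_spec rows 0
  rw [← hm] at hm_all hm_att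
  have hrowmem : ∀ i, i < L → rows.getD i [] ∈ rows := by
    intro i hi
    rw [List.getD_eq_getElem _ _ (by omega)]
    exact List.getElem_mem (by omega)
  have hm1 : 1 ≤ m := by
    have hne0 := stripRow_ne_nil _ (hgne 0 (by omega))
    have hmem := hrowmem 0 (by omega)
    rw [hrget 0 (by omega)] at hmem
    have := hm_all _ hmem
    have := List.length_pos_iff.mpr hne0
    omega
  have hmem_ex : ∀ r ∈ rows, ∃ i, i < L ∧ r = stripRow (rowSum (pol1.getD i []) (pol2.getD i [])) := by
    intro r hr
    obtain ⟨i, hi, hig⟩ := List.mem_iff_getElem.mp hr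
    refine ⟨i, by omega, ?_⟩
    rw [← hrget i (by omega), List.getD_eq_getElem _ _ hi, hig]
  have hmC : m ≤ C := by
    rcases hm_att with h | ⟨r, hr, hmr⟩
    · omega
    · obtain ⟨i, hi, rfl⟩ := hmem_ex r hr
      have hle := stripRow_length_le (rowSum (pol1.getD i []) (pol2.getD i []))
      rw [rowSum_length] at hle
      have := hlen1 i
      have := hlen2 i
      omega
  have hMup : ∀ j, m ≤ j → ∀ i, i < L → coefB pol1 pol2 i j = 0 := by
    intro j hj i hi
    have hmem := hrowmem i hi
    have hlenle := hm_all _ hmem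
    rw [hrget i hi] at hlenle
    rw [← hgf]
    exact stripRow_beyond _ _ (by omega)
  have hMlast : m = 1 ∨ ∃ i, i < L ∧ coefB pol1 pol2 i (m - 1) ≠ 0 := by
    rcases hm_att with h | ⟨r, hr, hmr⟩
    · omega
    · obtain ⟨i, hi, rfl⟩ := hmem_ex r hr
      rcases stripRow_last _ (hgne i (by omega)) with hs | hs
      · left; omega
      · right
        exact ⟨i, hi, by rw [hmr, ← hgf]; exact hs⟩
  -- scanned column count equals m
  have hncols : scanDown (fun j => (List.range L).any (fun i => coefB pol1 pol2 i j != 0))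
      ((List.range' 1 (C - 1)).reverse) = m := by
    obtain ⟨i1, i2, i3, i4⟩ := scanDown_spec
      (fun j => (List.range L).any (fun i => coefB pol1 pol2 i j != 0)) (C - 1)
    set N := scanDown (fun j => (List.range L).any (fun i => coefB pol1 pol2 i j != 0))
      ((List.range' 1 (C - 1)).reverse) with hN
    rcases Nat.lt_trichotomy m N with hlt | heq | hlt
    · exfalso
      have hN1 : N ≠ 1 := by omega
      have htrue := i4.resolve_left hN1
      have htrue' : ∃ i, i < L ∧ coefB pol1 pol2 i (N - 1) ≠ 0 := by
        simpa [List.any_eq_true, bne_iff_ne] using htrue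
      obtain ⟨i, hi, hne⟩ := htrue'
      exact hne (hMup (N - 1) (by omega) i hi)
    · exact heq.symm
    · exfalso
      have hm1' : m ≠ 1 := by omega
      obtain ⟨i, hi, hne⟩ := hMlast.resolve_left hm1'
      have hmC' : m - 1 ≤ C - 1 := by omega
      have hfalse := i3 (m - 1) (by omega) hmC'
      have : coefB pol1 pol2 i (m - 1) = 0 := by
        have := List.any_eq_false.mp hfalse i (List.mem_range.mpr hi)
        simpa using this
      exact hne this
  -- assemble
  show rows.map (fun r => r ++ List.replicate (m - r.length) 0) = somme2v_alt pol1 pol2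
  rw [somme2v_alt]
  simp only [← hR, ← hC, hnrows, hncols]
  apply ext_getD []
  · simp [hL]
  · intro i
    by_cases hi : i < L
    · rw [List.getD_eq_getElem _ _ (by simpa using hi),
          List.getD_eq_getElem _ _ (by simpa using hi)]
      rw [List.getElem_map, List.getElem_map]
      simp only [List.getElem_range]
      have hrilen : (rows[i]'(by omega)).length ≤ m := hm_all _ (List.getElem_mem (by omega))
      have hrieq : rows[i]'(by omega) = stripRow (rowSum (pol1.getD i []) (pol2.getD i [])) := by
        rw [← List.getD_eq_getElem rows [] (by omega), hrget i hi]
      apply ext_getD 0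
      · simp only [List.length_append, List.length_replicate, List.length_map, List.length_range]
        omega
      · intro j
        have hx : (rows[i]'(by omega) ++ List.replicate (m - (rows[i]'(by omega)).length) 0).getD j 0
            = coefB pol1 pol2 i j := by
          rw [getD_append_zeros, hrieq, ← stripRow_getD, hgf]
        rw [hx]
        by_cases hj : j < m
        · rw [List.getD_eq_getElem _ _ (by simpa using hj), List.getElem_map]
          simp only [List.getElem_range]
        · rw [List.getD_eq_default _ _ (by simpa using hj)]
          exact hMup j (by omega) i hi
    · rw [List.getD_eq_default _ _ (by simpa using hi),
          List.getD_eq_default _ _ (by simpa using hi)]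

-- ===== VERDICT (by name: the statement is the Claim_ definition above) =====
theorem somme2v_spec : Claim_equal_somme2v := by
  intro pol1 pol2 _ hpre
  unfold Spec_somme2v
  rw [somme2v_eq_canon pol1 pol2 hpre, canon_eq_alt pol1 pol2 hpre]
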